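-- pv_equiv track=rewrite | github.com/DebarghyaDey/textual_travel_guide | summarize.py | format_building_counts
-- ===== SOURCE A (Python) =====
-- def format_building_counts(building_counts: list[list[str]]):
--     building_summary = ""
--     # printing first summary
--     for i in range(3):
--         if not building_counts[i]: continue
--         if i == 0:
--             building_summary += f"Within a distance of 1 km, we have "
--         elif i == 1:
--             building_summary += f"Increasing the search space to 2 km yields in extra establishments such as "
--         else:
--             building_summary += f"Overall within 3 km, in addition to previously discovered buildings, one can come across "
--         for j in range(len(building_counts[i])):
--             if len(building_counts[i]) == 1:
--                 building_summary += f"{building_counts[i][j]}.\n\n"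
--             elif j == len(building_counts[i]) - 1:
--                 building_summary += f"and {building_counts[i][j]}.\n\n"
--             elif j == len(building_counts[i]) - 2:
--                 building_summary += f"{building_counts[i][j]} "
--             else:
--                 building_summary += f"{building_counts[i][j]}, "
--
--     return building_summary
-- ===== SOURCE B (Python) =====
-- def format_building_counts(building_counts: list[list[str]]):
--     prefixes = [
--         "Within a distance of 1 km, we have ",
--         "Increasing the search space to 2 km yields in extra establishments such as ",
--         "Overall within 3 km, in addition to previously discovered buildings, one can come across ",
--     ]
--     parts = []
--     for i in range(3):
--         items = building_counts[i]
--         if not items: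
--             continue
--         if len(items) == 1:
--             body = items[0]
--         else:
--             body = ", ".join(items[:-1]) + " and " + items[-1]
--         parts.append(prefixes[i] + body + ".\n\n")
--     return "".join(parts)
-- ===== Notes on version B (the rewrite author's own statement) =====
-- stated objective: simpler
-- what changed: The per-index inner loop with j==len-1 / j==len-2 branching is replaced by building each group's body directly: a single-element case plus ', '.join(items[:-1]) + ' and ' + items[-1], with the three prefixes taken from a list and the pieces joined at the end.
import Mathlib
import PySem

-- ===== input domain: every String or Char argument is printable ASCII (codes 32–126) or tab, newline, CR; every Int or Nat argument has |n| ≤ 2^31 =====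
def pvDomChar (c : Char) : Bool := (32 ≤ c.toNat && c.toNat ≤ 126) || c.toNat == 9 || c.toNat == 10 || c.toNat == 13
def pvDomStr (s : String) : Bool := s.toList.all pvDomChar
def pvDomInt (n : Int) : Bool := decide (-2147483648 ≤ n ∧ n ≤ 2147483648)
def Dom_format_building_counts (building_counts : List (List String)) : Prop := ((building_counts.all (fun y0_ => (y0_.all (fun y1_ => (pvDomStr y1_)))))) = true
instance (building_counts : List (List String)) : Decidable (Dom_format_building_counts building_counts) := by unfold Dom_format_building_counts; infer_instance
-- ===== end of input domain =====

-- B replaces A's index-branching inner loop (j==len-1 / j==len-2 cases) by a join-based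
-- body per group; equal return value on all inputs with at least 3 groups (simpler, not faster).

-- ===== PORT A =====
-- the inner 'for j in range(len(building_counts[i]))' loop of A, acting on the running summary s
def fbcInnerA (items : List String) (s : String) : String :=
  (List.range items.length).foldl (fun s j =>
    if items.length = 1 then s ++ items.getD j "" ++ ".\n\n"
    else if j = items.length - 1 then s ++ "and " ++ items.getD j "" ++ ".\n\n"
    else if j = items.length - 2 then s ++ items.getD j "" ++ " "
    else s ++ items.getD j "" ++ ", ") s

def format_building_counts (building_counts : List (List String)) : String :=
  (List.range 3).foldl (fun s i =>
    let items := building_counts.getD i []   -- building_counts[i]; Pre_ guarantees i < length (else Python raises IndexError)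
    if items = [] then s
    else
      fbcInnerA items
        (s ++ (if i = 0 then "Within a distance of 1 km, we have "
               else if i = 1 then "Increasing the search space to 2 km yields in extra establishments such as "
               else "Overall within 3 km, in addition to previously discovered buildings, one can come across "))) ""

-- ===== PORT B =====
def fbcPrefixes : List String :=
  ["Within a distance of 1 km, we have ",
   "Increasing the search space to 2 km yields in extra establishments such as ",
   "Overall within 3 km, in addition to previously discovered buildings, one can come across "]

def fbcBody (items : List String) : String :=
  if items.length = 1 then items.getD 0 ""
  else PySem.Str.join ", " (PySem.List.slice items none (some (-1))) ++ " and "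
       ++ (PySem.List.pyGet? items (-1)).getD ""

def format_building_counts_alt (building_counts : List (List String)) : String :=
  PySem.Str.join ""
    ((List.range 3).foldl (fun parts i =>
      let items := building_counts.getD i []   -- building_counts[i]; Pre_ guarantees i < length
      if items = [] then parts
      else parts ++ [fbcPrefixes.getD i "" ++ fbcBody items ++ ".\n\n"]) [])

-- ===== PRECONDITION & SPEC =====
-- Pre_ excludes only inputs with fewer than 3 groups, on which Python A raises IndexError.
def Pre_format_building_counts (building_counts : List (List String)) : Prop :=
  3 ≤ building_counts.length
instance (building_counts : List (List String)) : Decidable (Pre_format_building_counts building_counts) := by unfold Pre_format_building_counts; infer_instance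

def pvWitness_format_building_counts : List (List String) := [["bank", "school"], [], ["park"]]

def Spec_format_building_counts (building_counts : List (List String)) (out : String) : Prop := out = format_building_counts_alt building_counts
instance (building_counts : List (List String)) (out : String) : Decidable (Spec_format_building_counts building_counts out) := by unfold Spec_format_building_counts; infer_instance

-- ===== CLAIM (what is proved, stated in full; the proofs are below) =====
def Claim_equal_format_building_counts : Prop := ∀ (building_counts : List (List String)), Dom_format_building_counts building_counts → Pre_format_building_counts building_counts → Spec_format_building_counts building_counts (format_building_counts building_counts)

-- ===== LEMMAS AND PROOFS =====

-- proof-only characterisation of A's inner loop on a group of length ≥ 2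
def tailStr : List String → String
  | [] => ""
  | y :: rest =>
    if rest = [] then "and " ++ y ++ ".\n\n"
    else y ++ (if rest.length = 1 then " " else ", ") ++ tailStr rest

theorem foldl_shift (f : String → Nat → String) (g : String → Nat → String) (n : Nat)
    (hfg : ∀ s j, f s (j + 1) = g s j) (s : String) :
    (List.range (n + 1)).foldl f s = (List.range n).foldl g (f s 0) := by
  rw [List.range_succ_eq_map, List.foldl_cons, List.foldl_map]
  congr 1
  funext s j
  exact hfg s j

theorem fbcInnerA_eq_tailStr (items : List String) (h2 : 2 ≤ items.length) (s : String) :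
    fbcInnerA items s = s ++ tailStr items := by
  induction items generalizing s with
  | nil => simp at h2
  | cons x rest ih =>
    have hr : rest ≠ [] := by
      intro h; subst h; simp at h2
    have hr1 : 1 ≤ rest.length := List.length_pos_iff.mpr hr
    by_cases h1 : rest.length = 1
    · -- items = [x, y]
      obtain ⟨y, rfl⟩ : ∃ y, rest = [y] := by
        cases rest with
        | nil => simp at h1
        | cons a t =>
          cases t with
          | nil => exact ⟨a, rfl⟩
          | cons b u => simp at h1
      show fbcInnerA [x, y] s = _
      simp only [fbcInnerA, tailStr, List.length_cons, List.length_nil]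
      norm_num [List.range_succ, String.append_assoc]
    · -- rest.length ≥ 2: peel off the first step and use ih
      have hr2 : 2 ≤ rest.length := by omega
      have step : fbcInnerA (x :: rest) s = fbcInnerA rest (s ++ x ++ ", ") := by
        unfold fbcInnerA
        simp only [List.length_cons]
        rw [foldl_shift _
          (fun t j =>
            if rest.length = 1 then t ++ rest.getD j "" ++ ".\n\n"
            else if j = rest.length - 1 then t ++ "and " ++ rest.getD j "" ++ ".\n\n"
            else if j = rest.length - 2 then t ++ rest.getD j "" ++ " "
            else t ++ rest.getD j "" ++ ", ") rest.length]
        · congr 1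
          have hA : ¬ (rest.length + 1 = 1) := by omega
          have hB : ¬ ((0 : Nat) = rest.length + 1 - 1) := by omega
          have hC : ¬ ((0 : Nat) = rest.length + 1 - 2) := by omega
          simp only [if_neg hA, if_neg hB, if_neg hC, List.getD_cons_zero]
        · intro t j
          have hA : ¬ (rest.length + 1 = 1) := by omega
          simp only [if_neg hA, if_neg h1, List.getD_cons_succ]
          split_ifs <;> first | rfl | omega
      rw [step, ih hr2]
      have : tailStr (x :: rest) = x ++ ", " ++ tailStr rest := by
        simp [tailStr, hr, h1]
      rw [this]
      simp [String.append_assoc]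

theorem tailStr_eq_body (items : List String) (h2 : 2 ≤ items.length) :
    tailStr items
      = PySem.Str.join ", " items.dropLast ++ " and "
        ++ (items.getLast?.getD "") ++ ".\n\n" := by
  induction items with
  | nil => simp at h2
  | cons x rest ih =>
    cases rest with
    | nil => simp at h2
    | cons y rs =>
      cases rs with
      | nil =>
        -- [x, y]
        show tailStr [x, y] = _
        apply String.toList_injective
        simp [tailStr, PySem.Str.toList_join, PySem.Chars.join_singleton, List.append_assoc]
      | cons z ru =>
        have ih' := ih (by simp)
        have hne : (y :: z :: ru : List String) ≠ [] := by simp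
        have h1 : ¬ ((y :: z :: ru : List String).length = 1) := by simp
        show tailStr (x :: y :: z :: ru) = _
        rw [tailStr]
        simp only [if_neg hne, if_neg h1, ih']
        have hd : (x :: y :: z :: ru : List String).dropLast = x :: (y :: z :: ru).dropLast := by
          simp
        have hl : (x :: y :: z :: ru : List String).getLast? = (y :: z :: ru).getLast? := by
          simp
        rw [hd, hl]
        apply String.toList_injective
        have : ((y :: z :: ru : List String).dropLast).map String.toList
            = (y.toList :: ((z :: ru).dropLast.map String.toList)) := by simp
        simp only [PySem.Str.toList_join, String.toList_append, List.map_cons, this]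
        rw [PySem.Chars.join_cons_cons]
        simp [List.append_assoc]

theorem fbcInnerA_eq_fbcBody (items : List String) (h : items ≠ []) (s : String) :
    fbcInnerA items s = s ++ fbcBody items ++ ".\n\n" := by
  by_cases h1 : items.length = 1
  · obtain ⟨x, rfl⟩ : ∃ x, items = [x] := by
      cases items with
      | nil => simp at h1
      | cons a t =>
        cases t with
        | nil => exact ⟨a, rfl⟩
        | cons b u => simp at h1
    simp [fbcInnerA, fbcBody, String.append_assoc]
  · have h2 : 2 ≤ items.length := by
      have := List.length_pos_iff.mpr h
      omega
    rw [fbcInnerA_eq_tailStr items h2 s, tailStr_eq_body items h2]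
    unfold fbcBody
    rw [if_neg h1, PySem.List.slice_to_neg_one, PySem.List.pyGet?_neg_one]
    simp [String.append_assoc]

theorem join_empty_nil : PySem.Str.join "" ([] : List String) = "" := by
  apply String.toList_injective
  simp [PySem.Str.toList_join, PySem.Chars.join_nil]

theorem join_empty_cons (x : String) (l : List String) :
    PySem.Str.join "" (x :: l) = x ++ PySem.Str.join "" l := by
  apply String.toList_injective
  cases l with
  | nil => simp [PySem.Str.toList_join, PySem.Chars.join_singleton, PySem.Chars.join_nil]
  | cons y t =>
    simp only [PySem.Str.toList_join, List.map_cons, String.toList_append]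
    rw [PySem.Chars.join_cons_cons]
    simp

theorem join_empty_append (parts : List String) (q : String) :
    PySem.Str.join "" (parts ++ [q]) = PySem.Str.join "" parts ++ q := by
  induction parts with
  | nil => rw [List.nil_append, join_empty_cons, join_empty_nil]; simp
  | cons x t ih => rw [List.cons_append, join_empty_cons, join_empty_cons, ih, String.append_assoc]

theorem outer_step (s : String) (parts : List String) (items : List String) (p p' : String)
    (hp : p = p') (hs : s = PySem.Str.join "" parts) :
    (if items = [] then s else fbcInnerA items (s ++ p))
      = PySem.Str.join "" (if items = [] then parts
          else parts ++ [p' ++ fbcBody items ++ ".\n\n"]) := by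
  by_cases h : items = []
  · simp only [if_pos h, hs]
  · rw [if_neg h, if_neg h, fbcInnerA_eq_fbcBody items h, join_empty_append, hs, hp]
    simp [String.append_assoc]

theorem format_building_counts_spec : Claim_equal_format_building_counts := by
  intro bc _ _
  unfold Spec_format_building_counts format_building_counts format_building_counts_alt
  rw [show List.range 3 = [0, 1, 2] from rfl]
  simp only [List.foldl_cons, List.foldl_nil]
  exact outer_step _ _ _ _ _ rfl
          (outer_step _ _ _ _ _ rfl
            (outer_step _ _ _ _ _ rfl join_empty_nil.symm))
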